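-- pv_equiv track=rewrite | github.com/mycmon/Hierarchy_Sophie_Germain_Residues | demo_scaling_law.py | count_sg_residues
-- ===== SOURCE A (Python) =====
-- from math import gcd
--
-- def is_prime_simple(n):
--     """Test de primalité simple."""
--     if n < 2: return False
--     if n == 2: return True
--     if n % 2 == 0: return False
--     for i in range(3, int(n**0.5) + 1, 2):
--         if n % i == 0: return False
--     return True
--
-- def count_sg_residues(modulus):
--     """
--     Compte les résidus Sophie Germain mod modulus.
--
--     Un résidu r est SG si :
--       - gcd(r, modulus) = 1
--       - r peut être premier
--       - 2r+1 peut être premier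
--     """
--     count = 0
--     residues = []
--
--     for r in range(1, modulus):
--         # Copremier
--         if gcd(r, modulus) != 1:
--             continue
--
--         # r peut être premier (vérif sur petit exemple)
--         if r < 2:
--             continue
--
--         # 2r+1 ne doit pas être divisible par les facteurs de modulus
--         val_2r1 = (2 * r + 1) % modulus
--         if gcd(val_2r1, modulus) != 1 and val_2r1 != 0:
--             continue
--
--         # Pour petits modulus, vérifier vraiment
--         if modulus <= 2310:
--             if not is_prime_simple(r):
--                 continue
--             if not is_prime_simple(2*r + 1):
--                 continue
--
--         count += 1
--         if modulus <= 210:  # Stocker seulement pour petits modulus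
--             residues.append(r)
--
--     return count, residues
-- ===== SOURCE B (Python) =====
-- def _min_fac(n):
--     """Smallest factor >= 2 of n (n >= 2) by trial division."""
--     if n % 2 == 0:
--         return 2
--     d = 3
--     while d * d <= n:
--         if n % d == 0:
--             return d
--         d += 2
--     return n
--
--
-- def _prime_factors(n):
--     """Prime factors of n in nondecreasing order ([] for n < 2)."""
--     fs = []
--     while n >= 2:
--         p = _min_fac(n)
--         fs.append(p)
--         n //= p
--     return fs
--
--
-- def _is_prime(n):
--     return n >= 2 and _min_fac(n) == n
--
--
-- def count_sg_residues(modulus):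
--     primes = _prime_factors(modulus)
--
--     def coprime(x):
--         return all(x % p != 0 for p in primes)
--
--     small = modulus <= 2310
--
--     def ok(r):
--         if not coprime(r):
--             return False
--         v = (2 * r + 1) % modulus
--         if v != 0 and not coprime(v):
--             return False
--         return not small or (_is_prime(r) and _is_prime(2 * r + 1))
--
--     residues = [r for r in range(2, modulus) if ok(r)]
--     return len(residues), residues if modulus <= 210 else []
-- ===== Notes on version B (the rewrite author's own statement) =====
-- stated objective: alternative
-- what changed: B factors the modulus once and tests coprimality of r and (2r+1)%modulus by divisibility against those prime factors instead of calling gcd per residue, and replaces A's odd-trial-division primality test by a smallest-prime-factor (minFac) test, collecting the passing residues with a single filtered comprehension instead of A's continue-chain loop with two accumulators.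
import Mathlib
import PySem

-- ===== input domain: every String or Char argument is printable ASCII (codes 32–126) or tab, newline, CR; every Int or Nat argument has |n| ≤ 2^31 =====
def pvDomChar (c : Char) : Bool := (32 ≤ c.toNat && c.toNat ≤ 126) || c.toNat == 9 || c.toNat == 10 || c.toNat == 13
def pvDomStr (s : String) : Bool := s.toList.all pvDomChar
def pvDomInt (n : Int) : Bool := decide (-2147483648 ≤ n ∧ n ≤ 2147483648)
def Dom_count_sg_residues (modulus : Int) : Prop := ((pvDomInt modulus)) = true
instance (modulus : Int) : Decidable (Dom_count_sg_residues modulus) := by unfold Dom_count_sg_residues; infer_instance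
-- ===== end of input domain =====

-- B replaces A's per-residue gcd calls by divisibility tests against the prime factorisation of the
-- modulus (computed once) and A's odd-trial-division primality test by a smallest-factor test; this is
-- an alternative algorithm of similar cost, not claimed faster.

-- ===== PORT A =====
-- int(n**0.5) is ported as Nat.sqrt: exact, since for 0 ≤ n ≤ 2^32 the correctly rounded double sqrt
-- truncates to floor(sqrt n).
def isPrimeSimple (n : Int) : Bool :=
  if n < 2 then false
  else if n == 2 then true
  else if PySem.Int.mod n 2 == 0 then false
  else (PySem.List.pyRange 3 ((Nat.sqrt n.toNat : Int) + 1) 2).all (fun i => PySem.Int.mod n i != 0)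

-- the body of A's `for r in range(1, modulus)` loop, acting on the state (count, residues)
def pvStepA (modulus : Int) (st : Int × List Int) (r : Int) : Int × List Int :=
  if Int.gcd r modulus != 1 then st
  else if r < 2 then st
  else
    let val2r1 := PySem.Int.mod (2 * r + 1) modulus
    if Int.gcd val2r1 modulus != 1 && val2r1 != 0 then st
    else if modulus ≤ 2310 && !isPrimeSimple r then st
    else if modulus ≤ 2310 && !isPrimeSimple (2 * r + 1) then st
    else (st.1 + 1, if modulus ≤ 210 then st.2 ++ [r] else st.2)

def count_sg_residues (modulus : Int) : Int × List Int :=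
  (PySem.List.pyRange 1 modulus 1).foldl (pvStepA modulus) (0, [])

-- ===== PORT B =====
-- helpers are defined on Nat with a `.toNat` wrapper: Source B's `_min_fac`/`_prime_factors` only ever
-- divide and mod nonnegative ints, where Python's // and % agree with Nat division; for n < 2 both
-- Source B's `_prime_factors` and the wrapper return [].
def pvMinFacAux (n : Nat) (d : Nat) : Nat :=
  if n < d * d then n
  else if n % d = 0 then d
  else pvMinFacAux n (d + 2)
termination_by Nat.sqrt n + 2 - d
decreasing_by
  have hd : d * d ≤ n := Nat.le_of_not_lt ‹¬ n < d * d›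
  have hs : d ≤ Nat.sqrt n := Nat.le_sqrt'.mpr (by rwa [pow_two])
  omega

def pvMinFac (n : Nat) : Nat := if n % 2 = 0 then 2 else pvMinFacAux n 3

theorem pvMinFacAux_two_le (n d : Nat) (hn : 2 ≤ n) : 2 ≤ d → 2 ≤ pvMinFacAux n d := by
  fun_induction pvMinFacAux n d with
  | case1 d h => intro _; omega
  | case2 d h h2 => intro hd; omega
  | case3 d h h2 ih => intro hd; exact ih (by omega)

theorem pvMinFac_two_le {n : Nat} (h : 2 ≤ n) : 2 ≤ pvMinFac n := by
  unfold pvMinFac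
  split
  · omega
  · exact pvMinFacAux_two_le n 3 (by omega) (by omega)

def pvFactors (n : Nat) : List Nat :=
  if n < 2 then []
  else pvMinFac n :: pvFactors (n / pvMinFac n)
termination_by n
decreasing_by
  have h2 : 2 ≤ pvMinFac n := pvMinFac_two_le (by omega)
  exact Nat.div_lt_self (by omega) (by omega)

def pvIsPrime (n : Int) : Bool := decide (2 ≤ n) && (pvMinFac n.toNat == n.toNat)

def pvCoprimeB (primes : List Int) (x : Int) : Bool :=
  primes.all (fun p => PySem.Int.mod x p != 0)

def pvOkB (modulus : Int) (primes : List Int) (r : Int) : Bool :=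
  if !pvCoprimeB primes r then false
  else
    let v := PySem.Int.mod (2 * r + 1) modulus
    if v != 0 && !pvCoprimeB primes v then false
    else !(decide (modulus ≤ 2310)) || (pvIsPrime r && pvIsPrime (2 * r + 1))

def count_sg_residues_alt (modulus : Int) : Int × List Int :=
  let primes : List Int := (pvFactors modulus.toNat).map (fun (p : Nat) => (p : Int))
  let residues := (PySem.List.pyRange 2 modulus 1).filter (pvOkB modulus primes)
  ((residues.length : Int), if modulus ≤ 210 then residues else [])

-- ===== PRECONDITION & SPEC =====
def Spec_count_sg_residues (modulus : Int) (out : Int × List Int) : Prop := out = count_sg_residues_alt modulus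
instance (modulus : Int) (out : Int × List Int) : Decidable (Spec_count_sg_residues modulus out) := by unfold Spec_count_sg_residues; infer_instance

-- ===== CLAIM (what is proved, stated in full; the proofs are below) =====
def Claim_equal_count_sg_residues : Prop := ∀ (modulus : Int), Dom_count_sg_residues modulus → Spec_count_sg_residues modulus (count_sg_residues modulus)

-- ===== LEMMAS AND PROOFS =====

theorem pvMinFacAux_eq (n d : Nat) : pvMinFacAux n d = Nat.minFacAux n d := by
  fun_induction pvMinFacAux n d with
  | case1 d h => rw [Nat.minFacAux]; simp [h]
  | case2 d h h2 => rw [Nat.minFacAux]; simp [h, Nat.dvd_iff_mod_eq_zero, h2]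
  | case3 d h h2 ih =>
      rw [Nat.minFacAux]
      rw [if_neg h, if_neg (by simpa [Nat.dvd_iff_mod_eq_zero] using h2), ih]

theorem pvMinFac_eq (n : Nat) : pvMinFac n = Nat.minFac n := by
  unfold pvMinFac Nat.minFac
  simp [Nat.dvd_iff_mod_eq_zero, pvMinFacAux_eq]

theorem pvFactors_eq (n : Nat) : pvFactors n = Nat.primeFactorsList n := by
  fun_induction pvFactors n with
  | case1 n h =>
      have : n = 0 ∨ n = 1 := by omega
      rcases this with rfl | rfl <;> simp
  | case2 n h ih =>
      obtain ⟨k, rfl⟩ : ∃ k, n = k + 2 := ⟨n - 2, by omega⟩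
      simp only [pvMinFac_eq] at ih ⊢
      rw [Nat.primeFactorsList, ih]

theorem pvIsPrime_eq (n : Int) (h2 : 2 ≤ n) : pvIsPrime n = decide (Nat.Prime n.toNat) := by
  have hN : 2 ≤ n.toNat := by omega
  unfold pvIsPrime
  rw [pvMinFac_eq, Bool.eq_iff_iff]
  simp only [Bool.and_eq_true, decide_eq_true_eq, beq_iff_eq, Nat.prime_def_minFac]
  constructor
  · rintro ⟨-, h⟩; exact ⟨hN, h⟩
  · rintro ⟨-, h⟩; exact ⟨h2, h⟩

-- a natural number ≥ 2 is coprime to b ≠ 0 iff no prime factor of b divides it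
theorem nat_gcd_one_iff_factors (a b : Nat) (hb : b ≠ 0) :
    Nat.gcd a b = 1 ↔ ∀ p ∈ Nat.primeFactorsList b, ¬ p ∣ a := by
  rw [← Nat.coprime_iff_gcd_eq_one]
  constructor
  · intro h p hp hdvd
    exact absurd h (Nat.Prime.not_coprime_iff_dvd.mpr
      ⟨p, ((Nat.mem_primeFactorsList hb).1 hp).1, hdvd, ((Nat.mem_primeFactorsList hb).1 hp).2⟩)
  · intro h
    by_contra hnc
    obtain ⟨p, pp, pa, pb⟩ := Nat.Prime.not_coprime_iff_dvd.mp hnc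
    exact h p ((Nat.mem_primeFactorsList hb).2 ⟨pp, pb⟩) pa

theorem coprimeB_eq (m x : Int) (hm : 3 ≤ m) (hx : 0 ≤ x) :
    pvCoprimeB ((pvFactors m.toNat).map (fun (p : Nat) => (p : Int))) x = (Int.gcd x m == 1) := by
  rw [Bool.eq_iff_iff]
  unfold pvCoprimeB
  have hxn : (↑x.toNat : Int) = x := Int.toNat_of_nonneg hx
  have hmn : m.natAbs = m.toNat := by omega
  have hxa : x.natAbs = x.toNat := by omega
  simp only [List.all_eq_true, bne_iff_ne, ne_eq, beq_iff_eq, pvFactors_eq]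
  rw [Int.gcd_def, hmn, hxa, nat_gcd_one_iff_factors _ _ (by omega)]
  constructor
  · intro h p hp hdvd
    exact h (↑p) (List.mem_map_of_mem hp)
      ((PySem.Int.mod_eq_zero_iff_dvd x ↑p).mpr (by rw [← hxn]; exact_mod_cast hdvd))
  · intro h p hp hmod
    obtain ⟨q, hq, rfl⟩ := List.mem_map.1 hp
    have : (q : Int) ∣ x := (PySem.Int.mod_eq_zero_iff_dvd x ↑q).mp hmod
    exact h q hq (by rwa [Int.natCast_dvd, hxa] at this)

theorem isPrimeSimple_eq (n : Int) (h2 : 2 ≤ n) :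
    isPrimeSimple n = decide (Nat.Prime n.toNat) := by
  have hNn : (↑n.toNat : Int) = n := Int.toNat_of_nonneg (by omega)
  unfold isPrimeSimple
  rw [if_neg (by omega)]
  by_cases he : n = 2
  · subst he; simp; decide
  · rw [if_neg (by simpa using he)]
    have h3 : 3 ≤ n := by omega
    by_cases hev : PySem.Int.mod n 2 = 0
    · rw [if_pos (by simpa using hev)]
      have : (2 : Int) ∣ n := (PySem.Int.mod_eq_zero_iff_dvd n 2).mp hev
      have h2d : 2 ∣ n.toNat := by rw [← hNn] at this; exact_mod_cast this
      have : ¬ Nat.Prime n.toNat := by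
        intro hp
        rcases (Nat.Prime.eq_one_or_self_of_dvd hp 2 h2d) with h | h <;> omega
      simp [this]
    · rw [if_neg (by simpa using hev)]
      have hodd : ¬ 2 ∣ n.toNat := by
        intro hd
        exact hev ((PySem.Int.mod_eq_zero_iff_dvd n 2).mpr (by rw [← hNn]; exact_mod_cast hd))
      rw [Bool.eq_iff_iff]
      simp only [List.all_eq_true, decide_eq_true_eq, bne_iff_ne, ne_eq,
        PySem.List.mem_pyRange_iff_of_pos (by norm_num : (0:Int) < 2)]
      constructor
      · -- every candidate odd trial divisor fails to divide n ⇒ prime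
        intro h
        by_contra hnp
        set p := n.toNat.minFac with hp
        have pp : Nat.Prime p := Nat.minFac_prime (by omega)
        have pdvd : p ∣ n.toNat := Nat.minFac_dvd _
        have psq : p * p ≤ n.toNat := by
          have := Nat.minFac_sq_le_self (by omega) hnp
          nlinarith [this, sq_nonneg p]
        have ple : p ≤ Nat.sqrt n.toNat := Nat.le_sqrt'.mpr (by nlinarith)
        have pne2 : p ≠ 2 := fun h' => hodd (h' ▸ pdvd)
        have podd : p % 2 = 1 := Nat.odd_iff.mp (pp.odd_of_ne_two pne2)
        have p3 : 3 ≤ p := by have := pp.two_le; omega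
        refine h (↑p) ⟨by exact_mod_cast p3, by omega, ⟨(↑p - 3) / 2, by omega⟩⟩ ?_
        exact (PySem.Int.mod_eq_zero_iff_dvd n ↑p).mpr (by rw [← hNn]; exact_mod_cast pdvd)
      · -- prime ⇒ no trial divisor divides n
        rintro hp i ⟨hi3, hilt, -⟩ hmod
        have hdvd : i.toNat ∣ n.toNat := by
          have : i ∣ n := (PySem.Int.mod_eq_zero_iff_dvd n i).mp hmod
          rw [← hNn, ← Int.toNat_of_nonneg (by omega : 0 ≤ i)] at this
          exact_mod_cast this
        have hsq : Nat.sqrt n.toNat < n.toNat := Nat.sqrt_lt_self (by omega)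
        rcases Nat.Prime.eq_one_or_self_of_dvd hp i.toNat hdvd with h | h <;> omega

-- the common Boolean shape of A's continue-chain and B's single test
theorem pv_bool_shape {α : Type} (a b z s p q : Bool) (st inc : α) :
    (if (!a) = true then st
     else if (!b && !z) = true then st
     else if (s && !p) = true then st
     else if (s && !q) = true then st
     else inc)
    = if (if (!a) = true then false
          else if (!z && !b) = true then false
          else (!s || (p && q))) = true
      then inc else st := by
  cases a <;> cases b <;> cases z <;> cases s <;> cases p <;> cases q <;> rfl

-- A's loop body is a filtered increment: for 2 ≤ r < m it agrees with B's per-residue test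
theorem stepA_eq_okB (m r : Int) (st : Int × List Int) (hm : 3 ≤ m) (hr : 2 ≤ r) (_hrm : r < m) :
    pvStepA m st r =
      if pvOkB m ((pvFactors m.toNat).map (fun (p : Nat) => (p : Int))) r
      then (st.1 + 1, if m ≤ 210 then st.2 ++ [r] else st.2) else st := by
  have hv : 0 ≤ PySem.Int.mod (2 * r + 1) m := PySem.Int.mod_nonneg _ (by omega)
  dsimp only [pvStepA, pvOkB]
  simp only [coprimeB_eq m r hm (by omega),
    coprimeB_eq m (PySem.Int.mod (2 * r + 1) m) hm hv,
    pvIsPrime_eq r (by omega), pvIsPrime_eq (2 * r + 1) (by omega),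
    isPrimeSimple_eq r (by omega), isPrimeSimple_eq (2 * r + 1) (by omega)]
  rw [if_neg (by omega : ¬ r < 2)]
  simp only [bne]
  exact pv_bool_shape _ _ _ _ _ _ _ _

-- folding A's filtered increment over a list counts (and optionally collects) the passing elements
theorem foldl_filter_step (p : Int → Bool) (q : Prop) [Decidable q] (l : List Int)
    (c : Int) (res : List Int) :
    l.foldl (fun st r => if p r then (st.1 + 1, if q then st.2 ++ [r] else st.2) else st) (c, res)
      = (c + ((l.filter p).length : Int), if q then res ++ l.filter p else res) := by
  induction l generalizing c res with
  | nil => simp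
  | cons x xs ih =>
      by_cases hx : p x
      · rw [List.foldl_cons, if_pos hx, ih, List.filter_cons_of_pos hx]
        simp only [Prod.mk.injEq, List.length_cons]
        refine ⟨by push_cast; ring, by split_ifs <;> simp⟩
      · rw [List.foldl_cons, if_neg (by simp [hx]), ih, List.filter_cons_of_neg (by simp [hx])]

-- ===== VERDICT (by name: the statement is the Claim_ definition above) =====
theorem count_sg_residues_spec : Claim_equal_count_sg_residues := by
  intro m _
  show count_sg_residues m = count_sg_residues_alt m
  have step1 : pvStepA m (0, []) 1 = (0, []) := by
    unfold pvStepA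
    rw [if_neg (by simp [Int.one_gcd])]
    rw [if_pos (by norm_num)]
  unfold count_sg_residues count_sg_residues_alt
  by_cases hm : 3 ≤ m
  · have hcong : ∀ (st : Int × List Int), ∀ r ∈ PySem.List.pyRange 2 m 1,
        pvStepA m st r =
          (fun (st : Int × List Int) r =>
            if pvOkB m ((pvFactors m.toNat).map (fun (p : Nat) => (p : Int))) r
            then (st.1 + 1, if m ≤ 210 then st.2 ++ [r] else st.2) else st) st r := by
      intro st r hr
      obtain ⟨h1, h2, -⟩ := (PySem.List.mem_pyRange_iff_of_pos (by norm_num) r).mp hr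
      exact stepA_eq_okB m r st hm h1 h2
    rw [PySem.List.pyRange_one_cons (by omega : (1:Int) < m), List.foldl_cons, step1]
    have h12 : (1 : Int) + 1 = 2 := by norm_num
    rw [h12, PySem.List.foldl_congr_mem _ _ _ _ hcong, foldl_filter_step]
    simp
  · have h2 : PySem.List.pyRange 2 m 1 = [] := PySem.List.pyRange_one_eq_nil (by omega)
    have h1 : PySem.List.pyRange 1 m 1 = [] ∨ PySem.List.pyRange 1 m 1 = [1] := by
      by_cases hm1 : m ≤ 1
      · exact Or.inl (PySem.List.pyRange_one_eq_nil (by omega))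
      · have : m = 2 := by omega
        subst this
        exact Or.inr (PySem.List.pyRange_one_singleton 1)
    rcases h1 with h1 | h1 <;> rw [h1, h2] <;> simp [step1]
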